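-- pv_equiv track=rewrite | github.com/tbenavi1/HetSmoother | remove_het.py | get_snp_locations
-- ===== SOURCE A (Python) =====
-- def reverse_complement(kmer):
-- 	"""
-- 	Assumes kmers are upper case.
-- 	"""
-- 	complement = {'A':'T', 'C':'G', 'G':'C', 'T':'A', 'N':'N'}
-- 	return "".join(complement[base] for base in reversed(kmer))
--
-- def get_snp_locations(kmer1, kmer2, k):
-- 	"""
-- 	Assumes kmers have up to two SNPS different. Also accounts for the
-- 	possibility that the kmers may pair only if one them is noncanonical.
-- 	"""
-- 	locations = []
-- 	already_found_first = False
-- 	for i in range(k):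
-- 		if kmer1[i] != kmer2[i]:
-- 			locations.append(i)
-- 			if already_found_first:
-- 				if kmer1[i+1:] == kmer2[i+1:]:
-- 					return kmer2, locations
-- 				else:
-- 					return get_snp_locations(kmer1, reverse_complement(kmer2), k)
-- 			already_found_first = True
-- 	return kmer2, locations
-- ===== SOURCE B (Python) =====
-- def reverse_complement(kmer):
-- 	"""
-- 	Assumes kmers are upper case.
-- 	"""
-- 	complement = {'A':'T', 'C':'G', 'G':'C', 'T':'A', 'N':'N'}
-- 	return "".join(complement[base] for base in reversed(kmer))
--
-- def get_snp_locations(kmer1, kmer2, k):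
-- 	"""
-- 	Iterative instead of recursive: repeatedly build the complete mismatch
-- 	list for the current candidate in one full pass; up to two mismatches
-- 	means the pairing works as given, otherwise retry against the reverse
-- 	complement of the current candidate.
-- 	"""
-- 	cur = kmer2
-- 	while True:
-- 		locations = [i for i in range(k) if kmer1[i] != cur[i]]
-- 		if len(locations) <= 2:
-- 			return cur, locations
-- 		cur = reverse_complement(cur)
-- ===== Notes on version B (the rewrite author's own statement) =====
-- stated objective: simpler
-- what changed: B replaces A's early-exiting stateful recursion (with an inline per-position suffix-equality test) by an iterative while-loop that builds the complete mismatch list in one full pass per candidate and decides by a single length<=2 test.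
-- outside the precondition, e.g. on get_snp_locations('AAC', 'TTG', 2): A returns ('CAA', [0]), B returns ('TTG', [0, 1]); on get_snp_locations('ACGTA', 'ACGT', 5): A raises IndexError, B raises IndexError
import Mathlib
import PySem

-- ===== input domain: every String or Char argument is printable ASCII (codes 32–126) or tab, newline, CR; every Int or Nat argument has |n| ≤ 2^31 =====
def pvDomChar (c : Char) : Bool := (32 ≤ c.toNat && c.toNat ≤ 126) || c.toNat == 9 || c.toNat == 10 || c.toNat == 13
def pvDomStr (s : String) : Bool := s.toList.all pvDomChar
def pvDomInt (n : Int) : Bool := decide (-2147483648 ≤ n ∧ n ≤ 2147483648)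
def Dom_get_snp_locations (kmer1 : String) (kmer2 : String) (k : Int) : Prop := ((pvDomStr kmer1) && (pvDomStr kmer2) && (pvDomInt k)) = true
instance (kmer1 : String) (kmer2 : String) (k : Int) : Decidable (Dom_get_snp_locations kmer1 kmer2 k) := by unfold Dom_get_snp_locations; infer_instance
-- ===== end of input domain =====

-- B replaces A's early-exiting stateful recursion (with its inline suffix-equality test)
-- by an iterative loop that builds the complete mismatch list in one full pass per
-- candidate and decides by a single length test; objective: simpler.

-- ===== PORT A =====
-- complement[base]; for a base outside ACGTN Python raises KeyError (excluded by Pre_),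
-- here the character is returned unchanged (unreached inside Pre_).
def rcChar (c : Char) : Char :=
  if c = 'A' then 'T' else if c = 'C' then 'G' else if c = 'G' then 'C'
  else if c = 'T' then 'A' else if c = 'N' then 'N' else c

-- reverse_complement: join of complement over reversed(kmer); shared by both ports
def rc (kmer : String) : String := String.ofList (kmer.toList.reverse.map rcChar)

-- A's for-loop over i in range(k), ported as a lockstep recursion on the two character
-- lists with a budget of k iterations; exact under Pre_ (k equals both lengths, so the
-- indexing kmer1[i]/kmer2[i] never raises and the Python slices kmer1[i+1:], kmer2[i+1:]
-- are exactly the current tails t1, t2).  `some locs` = Python's `return kmer2, locations`;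
-- `none` = the recursive call on reverse_complement(kmer2).
def loopA : List Char → List Char → Nat → Int → List Int → Bool → Option (List Int)
  | _, _, 0, _, locs, _ => some locs
  | a :: t1, b :: t2, m + 1, i, locs, already =>
      if a ≠ b then
        if already then
          (if t1 = t2 then some (locs ++ [i]) else none)
        else loopA t1 t2 m (i + 1) (locs ++ [i]) true
      else loopA t1 t2 m (i + 1) locs already
  | _, _, _ + 1, _, locs, _ => some locs  -- IndexError in Python; unreached inside Pre_

-- fuel totalizes A's non-structural self-recursion; inside Pre_ at most one
-- recursive call happens, so fuel 2 is never exhausted there.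
def goA : Nat → String → String → Int → String × List Int
  | 0, _, kmer2, _ => (kmer2, [])
  | fuel + 1, kmer1, kmer2, k =>
      match loopA kmer1.toList kmer2.toList k.toNat 0 [] false with
      | some locs => (kmer2, locs)
      | none => goA fuel kmer1 (rc kmer2) k

def get_snp_locations (kmer1 : String) (kmer2 : String) (k : Int) : String × List Int :=
  goA 2 kmer1 kmer2 k

-- ===== PORT B =====
-- the comprehension [i for i in range(k) if kmer1[i] != cur[i]], ported as a filter of
-- the Python range; Str.pyGet? is Python's s[i] (none = IndexError, unreached inside Pre_)
def snpLocs (kmer1 cur : String) (k : Int) : List Int :=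
  (PySem.List.pyRange 0 k 1).filter
    (fun i => PySem.Str.pyGet? kmer1 i ≠ PySem.Str.pyGet? cur i)

-- B's `while True` loop, totalized by fuel; inside Pre_ at most one retry happens,
-- so fuel 2 is never exhausted there.
def goB : Nat → String → String → Int → String × List Int
  | 0, _, cur, _ => (cur, [])
  | fuel + 1, kmer1, cur, k =>
      let locs := snpLocs kmer1 cur k
      if locs.length ≤ 2 then (cur, locs) else goB fuel kmer1 (rc cur) k

def get_snp_locations_alt (kmer1 : String) (kmer2 : String) (k : Int) : String × List Int :=
  goB 2 kmer1 kmer2 k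

-- ===== PRECONDITION & SPEC =====
-- number of positions at which the two strings differ (Hamming distance)
def diffCount (l1 l2 : List Char) : Nat := ((l1.zip l2).filter (fun p => p.1 ≠ p.2)).length

-- Pre_ excludes inputs where k > a length (A raises IndexError), inputs with
-- 0 < k < length and ≥ 2 mismatches in the scanned window (A's suffix test
-- kmer1[i+1:] == kmer2[i+1:] reads beyond the window, so A and B can legitimately
-- disagree), and the k-mer pairs on which A raises (KeyError on a non-ACGTN base when
-- it recurses) or recurses forever (more than two mismatches against both kmer2 and
-- its reverse complement).
def Pre_get_snp_locations (kmer1 : String) (kmer2 : String) (k : Int) : Prop :=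
  k ≤ 0 ∨
  (k ≤ (kmer1.length : Int) ∧ k ≤ (kmer2.length : Int) ∧
    (((kmer1.toList.zip kmer2.toList).take k.toNat).filter (fun p => p.1 ≠ p.2)).length < 2) ∨
  (k = (kmer1.length : Int) ∧ k = (kmer2.length : Int) ∧
    (diffCount kmer1.toList kmer2.toList ≤ 2 ∨
      ((∀ c ∈ kmer2.toList, c ∈ ['A', 'C', 'G', 'T', 'N']) ∧
        diffCount kmer1.toList (rc kmer2).toList ≤ 2)))

instance (kmer1 : String) (kmer2 : String) (k : Int) : Decidable (Pre_get_snp_locations kmer1 kmer2 k) := by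
  unfold Pre_get_snp_locations; infer_instance

def pvWitness_get_snp_locations : String × String × Int := ("ACGT", "ACGA", 4)

def Spec_get_snp_locations (kmer1 : String) (kmer2 : String) (k : Int) (out : String × List Int) : Prop := out = get_snp_locations_alt kmer1 kmer2 k
instance (kmer1 : String) (kmer2 : String) (k : Int) (out : String × List Int) : Decidable (Spec_get_snp_locations kmer1 kmer2 k out) := by unfold Spec_get_snp_locations; infer_instance

-- ===== CLAIM (what is proved, stated in full; the proofs are below) =====
def Claim_equal_get_snp_locations : Prop := ∀ (kmer1 : String) (kmer2 : String) (k : Int), Dom_get_snp_locations kmer1 kmer2 k → Pre_get_snp_locations kmer1 kmer2 k → Spec_get_snp_locations kmer1 kmer2 k (get_snp_locations kmer1 kmer2 k)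

-- ===== LEMMAS AND PROOFS =====

-- proof-side reference loop: the mismatch positions of a window of m positions,
-- collected by a lockstep recursion; used to relate the two ports
def mismB : List Char → List Char → Nat → Int → List Int
  | a :: t1, b :: t2, m + 1, i =>
      if a ≠ b then i :: mismB t1 t2 m (i + 1) else mismB t1 t2 m (i + 1)
  | _, _, _, _ => []

-- the lockstep reference loop, as a filtered index range
theorem mismB_eq_range_filter : ∀ (m : Nat) (l1 l2 : List Char) (i0 : Int),
    m ≤ l1.length → m ≤ l2.length →
    mismB l1 l2 m i0 =
      ((List.range m).filter (fun j => l1[j]? ≠ l2[j]?)).map (fun j : Nat => i0 + (j : Int)) := by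
  intro m
  induction m with
  | zero => intro l1 l2 i0 _ _; cases l1 <;> cases l2 <;> simp [mismB]
  | succ m ih =>
    intro l1 l2 i0 h1 h2
    cases l1 with
    | nil => simp at h1
    | cons a t1 =>
      cases l2 with
      | nil => simp at h2
      | cons b t2 =>
        simp only [List.length_cons, Nat.succ_le_succ_iff] at h1 h2
        have hrest := ih t1 t2 (i0 + 1) h1 h2
        rw [List.range_succ_eq_map, List.filter_cons, List.filter_map]
        have hcomp : ((fun j => decide ((a :: t1)[j]? ≠ (b :: t2)[j]?)) ∘ Nat.succ)
            = fun j => decide (t1[j]? ≠ t2[j]?) := by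
          funext j; simp
        rw [hcomp]
        have hmapeq : ∀ l : List Nat,
            (l.map Nat.succ).map (fun j : Nat => i0 + (j : Int))
              = l.map (fun j : Nat => (i0 + 1) + (j : Int)) := by
          intro l
          rw [List.map_map]
          refine List.map_congr_left (fun j _ => ?_)
          simp [Function.comp, Nat.succ_eq_add_one]
          ring
        by_cases hab : a = b
        · subst hab
          simp only [List.getElem?_cons_zero, ne_eq, not_true_eq_false,
            decide_false, Bool.false_eq_true, if_false]
          rw [hmapeq]
          simpa [mismB] using hrest
        · simp only [List.getElem?_cons_zero, ne_eq, Option.some.injEq, hab,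
            not_false_eq_true, decide_true, if_true, List.map_cons]
          rw [hmapeq]
          simp only [mismB, hab, ne_eq, not_false_eq_true, if_true, hrest,
            Nat.cast_zero, add_zero]

-- B's comprehension equals the lockstep reference loop on in-range windows
theorem snpLocs_eq_mismB (kmer1 cur : String) (k : Int)
    (h1 : k.toNat ≤ kmer1.toList.length) (h2 : k.toNat ≤ cur.toList.length) :
    snpLocs kmer1 cur k = mismB kmer1.toList cur.toList k.toNat 0 := by
  rw [snpLocs, PySem.List.pyRange_one,
    mismB_eq_range_filter k.toNat kmer1.toList cur.toList 0 h1 h2,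
    List.filter_map]
  simp only [Int.sub_zero]
  refine congrArg (List.map _) (List.filter_congr fun j _ => ?_)
  simp [Function.comp]

-- on equal-length lists, the full mismatch list is empty iff the lists are equal
theorem mismB_eq_nil_iff (l1 l2 : List Char) (i : Int) (h : l1.length = l2.length) :
    mismB l1 l2 l1.length i = [] ↔ l1 = l2 := by
  induction l1 generalizing l2 i with
  | nil =>
    cases l2 with
    | nil => simp [mismB]
    | cons b t2 => simp at h
  | cons a t1 ih =>
    cases l2 with
    | nil => simp at h
    | cons b t2 =>
      simp only [List.length_cons, Nat.succ.injEq] at h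
      by_cases hab : a = b
      · subst hab
        simpa [mismB] using ih t2 (i + 1) h
      · simp [mismB, hab]

-- the mismatch list over a window of m positions, as a filter of the zipped window
theorem mismB_length_take (l1 : List Char) : ∀ (l2 : List Char) (m : Nat) (i : Int),
    m ≤ l1.length → m ≤ l2.length →
    (mismB l1 l2 m i).length = (((l1.zip l2).take m).filter (fun p => p.1 ≠ p.2)).length := by
  induction l1 with
  | nil => intro l2 m i h1 _; have hm0 : m = 0 := Nat.le_zero.mp (by simpa using h1); subst hm0; simp [mismB]
  | cons a t1 ih =>
    intro l2 m i h1 h2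
    cases m with
    | zero => simp [mismB]
    | succ m =>
      cases l2 with
      | nil => simp at h2
      | cons b t2 =>
        simp only [List.length_cons, Nat.succ_le_succ_iff] at h1 h2
        by_cases hab : a = b
        · simp [mismB, hab, ih t2 m (i + 1) h1 h2]
        · simp [mismB, hab, ih t2 m (i + 1) h1 h2]

-- on equal-length lists the full window gives the Hamming distance
theorem mismB_length (l1 l2 : List Char) (i : Int) (h : l1.length = l2.length) :
    (mismB l1 l2 l1.length i).length = diffCount l1 l2 := by
  rw [mismB_length_take l1 l2 l1.length i le_rfl h.le, diffCount,
    List.take_of_length_le (by simp [h])]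

-- with no mismatch left in the window, A's loop just returns its accumulator
theorem loopA_true_clean (l1 : List Char) : ∀ (l2 : List Char) (m : Nat) (i : Int)
    (locs : List Int), m ≤ l1.length → m ≤ l2.length → mismB l1 l2 m i = [] →
    loopA l1 l2 m i locs true = some locs := by
  induction l1 with
  | nil => intro l2 m i locs h1 _ _; have hm0 : m = 0 := Nat.le_zero.mp (by simpa using h1); subst hm0; simp [loopA]
  | cons a t1 ih =>
    intro l2 m i locs h1 h2 hnil
    cases m with
    | zero => simp [loopA]
    | succ m =>
      cases l2 with
      | nil => simp at h2
      | cons b t2 =>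
        simp only [List.length_cons, Nat.succ_le_succ_iff] at h1 h2
        by_cases hab : a = b
        · simp only [mismB, hab, ne_eq, not_true_eq_false, if_false] at hnil
          simpa [loopA, hab] using ih t2 m (i + 1) locs h1 h2 hnil
        · simp [mismB, hab] at hnil

-- with fewer than two mismatches in the window, A's loop collects them all
theorem loopA_false_window (l1 : List Char) : ∀ (l2 : List Char) (m : Nat) (i : Int)
    (locs : List Int), m ≤ l1.length → m ≤ l2.length → (mismB l1 l2 m i).length < 2 →
    loopA l1 l2 m i locs false = some (locs ++ mismB l1 l2 m i) := by
  induction l1 with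
  | nil => intro l2 m i locs h1 _ _; have hm0 : m = 0 := Nat.le_zero.mp (by simpa using h1); subst hm0; simp [loopA, mismB]
  | cons a t1 ih =>
    intro l2 m i locs h1 h2 hlt
    cases m with
    | zero => simp [loopA, mismB]
    | succ m =>
      cases l2 with
      | nil => simp at h2
      | cons b t2 =>
        simp only [List.length_cons, Nat.succ_le_succ_iff] at h1 h2
        by_cases hab : a = b
        · simp only [mismB, hab, ne_eq, not_true_eq_false, if_false] at hlt ⊢
          simpa [loopA, hab] using ih t2 m (i + 1) locs h1 h2 hlt
        · simp only [mismB, hab, ne_eq, not_false_eq_true, if_true, List.length_cons] at hlt ⊢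
          have htail : mismB t1 t2 m (i + 1) = [] := by
            have : (mismB t1 t2 m (i + 1)).length = 0 := by omega
            exact List.eq_nil_of_length_eq_zero this
          simp [loopA, hab, loopA_true_clean t1 t2 m (i + 1) (locs ++ [i]) h1 h2 htail, htail]

-- A's loop after the first mismatch was found
theorem loopA_true (l1 l2 : List Char) (i : Int) (locs : List Int)
    (h : l1.length = l2.length) :
    loopA l1 l2 l1.length i locs true =
      if (mismB l1 l2 l1.length i).length ≤ 1
      then some (locs ++ mismB l1 l2 l1.length i) else none := by
  induction l1 generalizing l2 i locs with
  | nil =>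
    cases l2 with
    | nil => simp [loopA, mismB]
    | cons b t2 => simp at h
  | cons a t1 ih =>
    cases l2 with
    | nil => simp at h
    | cons b t2 =>
      simp only [List.length_cons, Nat.succ.injEq] at h
      by_cases hab : a = b
      · subst hab
        simpa [loopA, mismB] using ih t2 (i + 1) locs h
      · have htail := mismB_eq_nil_iff t1 t2 (i + 1) h
        by_cases ht : t1 = t2
        · subst ht
          have hnil : mismB t1 t1 t1.length (i + 1) = [] := htail.mpr rfl
          simp [loopA, mismB, hab, hnil]
        · have hne : mismB t1 t2 t1.length (i + 1) ≠ [] := fun hnil => ht (htail.mp hnil)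
          have hlen1 : 1 ≤ (mismB t1 t2 t1.length (i + 1)).length := by
            cases hmm : mismB t1 t2 t1.length (i + 1) with
            | nil => exact absurd hmm hne
            | cons x xs => simp
          have hgt : ¬ (i :: mismB t1 t2 t1.length (i + 1)).length ≤ 1 := by
            simp only [List.length_cons]; omega
          simp [loopA, mismB, hab, ht, hne]

-- A's loop from its initial state returns the full mismatch list iff there are at most two
theorem loopA_false (l1 l2 : List Char) (i : Int) (locs : List Int)
    (h : l1.length = l2.length) :
    loopA l1 l2 l1.length i locs false =
      if (mismB l1 l2 l1.length i).length ≤ 2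
      then some (locs ++ mismB l1 l2 l1.length i) else none := by
  induction l1 generalizing l2 i locs with
  | nil =>
    cases l2 with
    | nil => simp [loopA, mismB]
    | cons b t2 => simp at h
  | cons a t1 ih =>
    cases l2 with
    | nil => simp at h
    | cons b t2 =>
      simp only [List.length_cons, Nat.succ.injEq] at h
      by_cases hab : a = b
      · subst hab
        simpa [loopA, mismB] using ih t2 (i + 1) locs h
      · have htrue := loopA_true t1 t2 (i + 1) (locs ++ [i]) h
        simp only [loopA, mismB, hab, ne_eq, not_false_eq_true, if_pos,
          Bool.false_eq_true, if_false, htrue, List.length_cons]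
        by_cases hle : (mismB t1 t2 t1.length (i + 1)).length ≤ 1
        · simp [hle, show (mismB t1 t2 t1.length (i + 1)).length + 1 ≤ 2 from by omega]
        · simp [hle, show ¬ (mismB t1 t2 t1.length (i + 1)).length + 1 ≤ 2 from by omega]

theorem rc_length (s : String) : (rc s).toList.length = s.toList.length := by
  simp [rc]

theorem get_snp_locations_spec' (kmer1 kmer2 : String) (k : Int)
    (hpre : Pre_get_snp_locations kmer1 kmer2 k) :
    get_snp_locations kmer1 kmer2 k = get_snp_locations_alt kmer1 kmer2 k := by
  rcases hpre with hk | ⟨hle1, hle2, hw⟩ | ⟨h1, h2, hdisj⟩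
  · -- k ≤ 0: range(k) is empty, both return (kmer2, [])
    have : k.toNat = 0 := Int.toNat_of_nonpos hk
    simp [get_snp_locations, get_snp_locations_alt, goA, goB, snpLocs, this, loopA,
      PySem.List.pyRange_one_eq_nil (by omega : k ≤ 0)]
  · -- 0 < k ≤ both lengths and fewer than two mismatches in the scanned window:
    -- A's loop never reaches its suffix test, both return the window's mismatches
    have hm1 : k.toNat ≤ kmer1.toList.length := by
      simp only [String.length_toList]; exact Int.toNat_le.mpr hle1
    have hm2 : k.toNat ≤ kmer2.toList.length := by
      simp only [String.length_toList]; exact Int.toNat_le.mpr hle2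
    have hmb : (mismB kmer1.toList kmer2.toList k.toNat 0).length < 2 := by
      rw [mismB_length_take kmer1.toList kmer2.toList k.toNat 0 hm1 hm2]; exact hw
    have hloop := loopA_false_window kmer1.toList kmer2.toList k.toNat 0 [] hm1 hm2 hmb
    have hsnp := snpLocs_eq_mismB kmer1 kmer2 k hm1 hm2
    simp only [get_snp_locations, get_snp_locations_alt, goA, goB, hloop, hsnp,
      if_pos (by omega : (mismB kmer1.toList kmer2.toList k.toNat 0).length ≤ 2),
      List.nil_append]
  · -- k = |kmer1| = |kmer2|
    have hlen : kmer1.toList.length = kmer2.toList.length := by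
      have hil : (kmer1.length : Int) = (kmer2.length : Int) := by omega
      have hl : kmer1.length = kmer2.length := by exact_mod_cast hil
      simpa using hl
    have hk1 : k.toNat = kmer1.toList.length := by
      have h' : k = ((kmer1.toList.length : Nat) : Int) := by simpa using h1
      omega
    have hm1 : k.toNat ≤ kmer1.toList.length := hk1.le
    have hm2 : k.toNat ≤ kmer2.toList.length := by omega
    have hml := mismB_length kmer1.toList kmer2.toList 0 hlen
    have hloop := loopA_false kmer1.toList kmer2.toList 0 [] hlen
    have hsnp := snpLocs_eq_mismB kmer1 kmer2 k hm1 hm2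
    by_cases hle : (mismB kmer1.toList kmer2.toList kmer1.toList.length 0).length ≤ 2
    · simp only [get_snp_locations, get_snp_locations_alt, goA, goB, hk1, hloop, hsnp,
        if_pos hle, List.nil_append]
    · -- both recurse on the reverse complement, where at most two mismatches remain
      have hd2 : diffCount kmer1.toList (rc kmer2).toList ≤ 2 := by
        rcases hdisj with hd | ⟨_, hd⟩
        · exact absurd (hml ▸ hd) hle
        · exact hd
      have hlen' : kmer1.toList.length = (rc kmer2).toList.length := by
        rw [rc_length]; exact hlen
      have hm2' : k.toNat ≤ (rc kmer2).toList.length := by rw [rc_length]; omega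
      have hml' := mismB_length kmer1.toList (rc kmer2).toList 0 hlen'
      have hloop' := loopA_false kmer1.toList (rc kmer2).toList 0 [] hlen'
      have hsnp' := snpLocs_eq_mismB kmer1 (rc kmer2) k hm1 hm2'
      have hle' : (mismB kmer1.toList (rc kmer2).toList kmer1.toList.length 0).length ≤ 2 :=
        hml' ▸ hd2
      simp only [get_snp_locations, get_snp_locations_alt, goA, goB, hk1, hloop, hloop',
        hsnp, hsnp', if_neg hle, if_pos hle', List.nil_append]

-- ===== VERDICT (by name: the statement is the Claim_ definition above) =====
theorem get_snp_locations_spec : Claim_equal_get_snp_locations := by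
  intro kmer1 kmer2 k _ hpre
  exact get_snp_locations_spec' kmer1 kmer2 k hpre
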